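-- pv_equiv track=rewrite | github.com/Oz-a/numchecker | biganim.py | biggest
-- ===== SOURCE A (Python) =====
-- def biggest(adict):
--   '''
--   get a dictionary composed of list values
--   returns the key of the longest list
--   '''
--   tempdict = {}
--   for k in adict.keys():
--     tempdict[k] = len(adict[k])
--
--   biggest = max(tempdict.values())
--
--   for k in adict:
--     if len(adict[k]) == biggest:
--       return k
-- ===== SOURCE B (Python) =====
-- def biggest(adict):
--   return max(adict, key=lambda k: len(adict[k]))
-- ===== Notes on version B (the rewrite author's own statement) =====
-- stated objective: idiomatic
-- what changed: Replaces the three-phase version (build a dict of lengths, max over its values, rescan the keys for the first match) by a single keyed argmax max(adict, key=lambda k: len(adict[k])), with no temporary dict.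
import Mathlib
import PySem

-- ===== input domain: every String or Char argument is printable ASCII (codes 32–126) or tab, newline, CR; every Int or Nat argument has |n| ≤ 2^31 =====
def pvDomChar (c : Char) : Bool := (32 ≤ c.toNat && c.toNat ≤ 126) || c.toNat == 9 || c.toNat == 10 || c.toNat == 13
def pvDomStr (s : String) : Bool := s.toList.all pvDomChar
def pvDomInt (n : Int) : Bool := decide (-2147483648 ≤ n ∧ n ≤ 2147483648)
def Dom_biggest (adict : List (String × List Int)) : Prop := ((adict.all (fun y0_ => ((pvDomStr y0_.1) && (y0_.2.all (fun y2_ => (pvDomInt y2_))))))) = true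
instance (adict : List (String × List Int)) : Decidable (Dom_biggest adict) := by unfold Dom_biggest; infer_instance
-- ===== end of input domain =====

-- B replaces A's three phases (length table, max of values, rescan for the first matching key)
-- by one keyed argmax over the keys; idiomatic, same O(n) cost.

-- models Python's `adict[k]` (dict subscription, first-match lookup); used by both ports
def pyGetItem (adict : List (String × List Int)) (k : String) : List Int :=
  (PySem.Dict.mk adict).getD k []

-- ===== PORT A =====
def biggest (adict : List (String × List Int)) : String :=
  let tempdict : PySem.Dict String Int :=
    adict.foldl (fun d p => d.insert p.1 (PySem.List.len (pyGetItem adict p.1))) PySem.Dict.empty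
  match PySem.List.max? tempdict.values (fun v => v) with
  | none => ""      -- Python: max() raises ValueError here (empty dict); outside Pre_
  | some big =>
    match adict.find? (fun p => PySem.List.len (pyGetItem adict p.1) == big) with
    | some p => p.1
    | none => ""    -- Python falls through returning None; unreachable for a nonempty dict

-- ===== PORT B =====
def biggest_alt (adict : List (String × List Int)) : String :=
  match PySem.List.max? (adict.map (·.1)) (fun k => PySem.List.len (pyGetItem adict k)) with
  | some k => k
  | none => ""      -- Python: max() raises ValueError on an empty dict; outside Pre_

-- ===== PRECONDITION & SPEC =====
-- Pre_ excludes only the empty dict, on which both Pythons raise ValueError (max of an empty sequence).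
def Pre_biggest (adict : List (String × List Int)) : Prop := adict ≠ []
instance (adict : List (String × List Int)) : Decidable (Pre_biggest adict) := by unfold Pre_biggest; infer_instance
def pvWitness_biggest : (List (String × List Int)) := [("a", [1, 2]), ("b", [3])]
def Spec_biggest (adict : List (String × List Int)) (out : String) : Prop := out = biggest_alt adict
instance (adict : List (String × List Int)) (out : String) : Decidable (Spec_biggest adict out) := by unfold Spec_biggest; infer_instance

-- ===== CLAIM (what is proved, stated in full; the proofs are below) =====
def Claim_equal_biggest : Prop := ∀ (adict : List (String × List Int)), Dom_biggest adict → Pre_biggest adict → Spec_biggest adict (biggest adict)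

-- ===== LEMMAS AND PROOFS =====

-- lookup-after-the-fold: inserting (k, g k) for every key of l gives getD = g on l's keys
theorem getD_fold_insert_fn (l : List (String × List Int)) (g : String → Int)
    (d : PySem.Dict String Int) (k : String) :
    (l.foldl (fun d p => d.insert p.1 (g p.1)) d).getD k 0
      = if k ∈ l.map (·.1) then g k else d.getD k 0 := by
  induction l generalizing d with
  | nil => simp
  | cons p t ih =>
    simp only [List.foldl_cons, ih, List.map_cons, List.mem_cons]
    by_cases hk : k ∈ t.map (·.1)
    · simp [hk]
    · simp [hk, PySem.Dict.getD_insert]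
      by_cases he : k = p.1 <;> simp [he]

-- the step function of Python's max (as PySem.List.max? folds it)
def maxStep (f : String → Int) (acc : Option String) (x : String) : Option String :=
  match acc with
  | none => some x
  | some m => if f m < f x then some x else some m

theorem max?_eq_foldl_maxStep (f : String → Int) (xs : List String) :
    PySem.List.max? xs f = xs.foldl (maxStep f) none := by
  simp only [PySem.List.max?]
  congr 1
  funext acc x
  cases acc <;> simp [maxStep]

-- the max?-foldl keeps the FIRST maximum: accumulator version
theorem max_foldl_first (f : String → Int) :
    ∀ (xs : List String) (a m : String),
    xs.foldl (maxStep f) (some a) = some m →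
    (∀ y ∈ xs, f y ≤ f m) ∧ f a ≤ f m ∧
      (m = a ∨ ∃ pre suf, xs = pre ++ m :: suf ∧ (∀ y ∈ pre, f y < f m) ∧ f a < f m) := by
  intro xs
  induction xs with
  | nil => intro a m h; simp at h; simp [h]
  | cons x t ih =>
    intro a m h
    simp only [List.foldl_cons, maxStep] at h
    by_cases hx : f a < f x
    · rw [if_pos hx] at h
      obtain ⟨h1, h2, h3⟩ := ih x m h
      refine ⟨?_, le_of_lt (lt_of_lt_of_le hx h2), ?_⟩
      · intro y hy
        rcases List.mem_cons.1 hy with rfl | hy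
        · exact h2
        · exact h1 y hy
      · rcases h3 with rfl | ⟨pre, suf, rfl, hpre, hax⟩
        · exact Or.inr ⟨[], t, rfl, by simp, hx⟩
        · refine Or.inr ⟨x :: pre, suf, rfl, ?_, lt_trans hx hax⟩
          intro y hy
          rcases List.mem_cons.1 hy with rfl | hy
          · exact hax
          · exact hpre y hy
    · rw [if_neg hx] at h
      obtain ⟨h1, h2, h3⟩ := ih a m h
      refine ⟨?_, h2, ?_⟩
      · intro y hy
        rcases List.mem_cons.1 hy with rfl | hy
        · exact le_trans (le_of_not_gt hx) h2
        · exact h1 y hy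
      · rcases h3 with rfl | ⟨pre, suf, rfl, hpre, ham⟩
        · exact Or.inl rfl
        · refine Or.inr ⟨x :: pre, suf, rfl, ?_, ham⟩
          intro y hy
          rcases List.mem_cons.1 hy with rfl | hy
          · exact lt_of_le_of_lt (le_of_not_gt hx) ham
          · exact hpre y hy

-- packaged form on max?
theorem max?_first (f : String → Int) (xs : List String) (m : String)
    (h : PySem.List.max? xs f = some m) :
    (∀ y ∈ xs, f y ≤ f m) ∧ ∃ pre suf, xs = pre ++ m :: suf ∧ (∀ y ∈ pre, f y < f m) := by
  cases xs with
  | nil => simp [PySem.List.max?] at h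
  | cons x t =>
    rw [max?_eq_foldl_maxStep] at h
    simp only [List.foldl_cons, maxStep] at h
    obtain ⟨h1, h2, h3⟩ := max_foldl_first f t x m h
    constructor
    · intro y hy
      rcases List.mem_cons.1 hy with rfl | hy
      · exact h2
      · exact h1 y hy
    · rcases h3 with rfl | ⟨pre, suf, rfl, hpre, hxm⟩
      · exact ⟨[], t, rfl, by simp⟩
      · refine ⟨x :: pre, suf, rfl, ?_⟩
        intro y hy
        rcases List.mem_cons.1 hy with rfl | hy
        · exact hxm
        · exact hpre y hy

-- ===== VERDICT (by name: the statement is the Claim_ definition above) =====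
theorem biggest_spec : Claim_equal_biggest := by
  intro adict _ hpre
  unfold Spec_biggest biggest biggest_alt
  cases hB : PySem.List.max? (adict.map (·.1)) (fun k => PySem.List.len (pyGetItem adict k)) with
  | none =>
    exact absurd (List.map_eq_nil_iff.1 ((PySem.List.max?_eq_none_iff _ _).1 hB)) hpre
  | some m =>
    obtain ⟨hmax, pre, suf, hdec, hprelt⟩ :=
      max?_first (fun k => PySem.List.len (pyGetItem adict k)) (adict.map (·.1)) m hB
    have hmks : m ∈ adict.map (·.1) := by rw [hdec]; simp
    -- tempdict's keys and values
    have hnd : (adict.foldl (fun d p => d.insert p.1 (PySem.List.len (pyGetItem adict p.1)))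
        PySem.Dict.empty).keys.Nodup :=
      PySem.Dict.nodup_keys_foldl_insert_key _ _ _ _ PySem.Dict.nodup_keys_empty
    have hkeys : (adict.foldl (fun d p => d.insert p.1 (PySem.List.len (pyGetItem adict p.1)))
        PySem.Dict.empty).keys = PySem.Set.ofList (adict.map (·.1)) := by
      rw [PySem.Dict.keys_foldl_insert_key adict (fun p => p.1)
        (fun _ p => PySem.List.len (pyGetItem adict p.1)) PySem.Dict.empty]
      simp [PySem.Dict.keys_empty, PySem.Set.update_nil_left]
    have hvals : (adict.foldl (fun d p => d.insert p.1 (PySem.List.len (pyGetItem adict p.1)))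
        PySem.Dict.empty).values
        = (PySem.Set.ofList (adict.map (·.1))).map (fun k => PySem.List.len (pyGetItem adict k)) := by
      rw [PySem.Dict.values_eq_map_keys _ hnd 0, hkeys]
      apply List.map_congr_left
      intro k hk
      rw [getD_fold_insert_fn adict (fun k => PySem.List.len (pyGetItem adict k)) PySem.Dict.empty k]
      simp [(PySem.Set.mem_ofList _ _).1 hk]
    have hfm_mem : PySem.List.len (pyGetItem adict m)
        ∈ (adict.foldl (fun d p => d.insert p.1 (PySem.List.len (pyGetItem adict p.1)))
            PySem.Dict.empty).values := by
      rw [hvals]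
      exact List.mem_map_of_mem ((PySem.Set.mem_ofList _ _).2 hmks)
    cases hA : PySem.List.max?
        (adict.foldl (fun d p => d.insert p.1 (PySem.List.len (pyGetItem adict p.1)))
          PySem.Dict.empty).values (fun v => v) with
    | none =>
      rw [(PySem.List.max?_eq_none_iff _ _).1 hA] at hfm_mem
      simp at hfm_mem
    | some big =>
      have hbig_mem := PySem.List.max?_mem hA
      have hble : big ≤ PySem.List.len (pyGetItem adict m) := by
        rw [hvals] at hbig_mem
        obtain ⟨k0, hk0, hk0e⟩ := List.mem_map.1 hbig_mem
        rw [← hk0e]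
        exact hmax k0 ((PySem.Set.mem_ofList _ _).1 hk0)
      have hbigeq : big = PySem.List.len (pyGetItem adict m) :=
        le_antisymm hble (PySem.List.max?_isMax hA _ hfm_mem)
      -- the rescan loop finds exactly m
      have hfindks : (adict.map (·.1)).find?
          (fun k => PySem.List.len (pyGetItem adict k) == big) = some m := by
        rw [hbigeq, hdec, List.find?_append]
        have h1 : pre.find? (fun k => PySem.List.len (pyGetItem adict k)
            == PySem.List.len (pyGetItem adict m)) = none :=
          List.find?_eq_none.2 (fun y hy => by simpa using ne_of_lt (hprelt y hy))
        rw [h1]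
        simp
      rw [List.find?_map] at hfindks
      obtain ⟨pm, hpm, hpm1⟩ := Option.map_eq_some_iff.1 hfindks
      have hpm' : adict.find? (fun p => PySem.List.len (pyGetItem adict p.1) == big) = some pm := hpm
      show (match PySem.List.max?
          (adict.foldl (fun d p => d.insert p.1 (PySem.List.len (pyGetItem adict p.1)))
            PySem.Dict.empty).values (fun v => v) with
        | none => ("" : String)
        | some big =>
          match adict.find? (fun p => PySem.List.len (pyGetItem adict p.1) == big) with
          | some p => p.1
          | none => "") = (match some m with | some k => k | none => ("" : String))
      rw [hA]
      simp only [hpm']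
      exact hpm1
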